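-- pv_equiv track=rewrite | github.com/theot865-hub/ai-assistant-v2 | workers/business_outreach_worker.py | _parse_campaign_prompt
-- ===== SOURCE A (Python) =====
-- def _parse_campaign_prompt(prompt_text: str) -> dict[str, str]:
--     sections = {"goal": "", "audience": "", "tone": "", "offer": ""}
--     current = ""
--     for line in prompt_text.splitlines():
--         stripped = line.strip()
--         if not stripped:
--             continue
--         lowered = stripped.lower()
--         if lowered.startswith("goal:"):
--             current = "goal"
--             sections[current] = stripped[5:].strip()
--             continue
--         if lowered.startswith("audience:"):
--             current = "audience"
--             sections[current] = stripped[9:].strip()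
--             continue
--         if lowered.startswith("tone:"):
--             current = "tone"
--             sections[current] = stripped[5:].strip()
--             continue
--         if lowered.startswith("offer:"):
--             current = "offer"
--             sections[current] = stripped[6:].strip()
--             continue
--         if current:
--             existing = sections[current]
--             sections[current] = f"{existing} {stripped}".strip()
--     return sections
-- ===== SOURCE B (Python) =====
-- LABELS = (("goal", "goal:"), ("audience", "audience:"), ("tone", "tone:"), ("offer", "offer:"))
--
--
-- def _parse_campaign_prompt(prompt_text: str) -> dict[str, str]:
--     # Pass 1: group the non-blank lines by the label line that opens each group.
--     groups: list[tuple[str, list[str]]] = []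
--     for line in prompt_text.splitlines():
--         stripped = line.strip()
--         if not stripped:
--             continue
--         low = stripped.lower()
--         for key, tag in LABELS:
--             if low.startswith(tag):
--                 groups.append((key, [stripped[len(tag):].strip()]))
--                 break
--         else:
--             if groups:
--                 groups[-1][1].append(stripped)
--     # Pass 2: one value per group (later group with the same key overwrites).
--     sections = dict.fromkeys((key for key, _ in LABELS), "")
--     for key, parts in groups:
--         sections[key] = " ".join(p for p in parts if p)
--     return sections
-- ===== Notes on version B (the rewrite author's own statement) =====
-- stated objective: alternative
-- what changed: B replaces A's single accumulating scan over a mutable sections/current pair with a two-pass decomposition: pass 1 partitions the non-blank lines into labeled groups driven by a label table, pass 2 joins each group's non-empty pieces and writes one value per group (later groups overwrite).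
import Mathlib
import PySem

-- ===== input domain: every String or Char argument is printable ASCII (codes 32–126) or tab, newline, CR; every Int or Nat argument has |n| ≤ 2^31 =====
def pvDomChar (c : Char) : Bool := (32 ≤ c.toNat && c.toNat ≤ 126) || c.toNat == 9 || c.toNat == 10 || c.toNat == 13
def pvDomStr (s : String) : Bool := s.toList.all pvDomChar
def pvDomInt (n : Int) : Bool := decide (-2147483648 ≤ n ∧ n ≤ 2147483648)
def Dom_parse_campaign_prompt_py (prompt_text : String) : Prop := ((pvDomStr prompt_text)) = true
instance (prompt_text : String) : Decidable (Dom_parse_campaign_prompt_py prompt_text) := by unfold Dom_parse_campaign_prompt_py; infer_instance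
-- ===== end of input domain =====

-- B re-implements the parser as a two-pass grouping (partition lines into labeled groups, then join
-- each group's non-empty pieces), a different decomposition of the same task; objective: alternative.

-- ===== PORT A =====
-- A's loop body, named so the proofs can speak about one step; it is A's code verbatim.
def pvStepA (st : PySem.Dict String String × String) (line : String) :
    PySem.Dict String String × String :=
  let sections := st.1
  let current := st.2
  let stripped := PySem.Str.strip line
  if stripped = "" then st
  else
    let lowered := PySem.Str.lower stripped
    if PySem.Str.startswith lowered "goal:" then
      (sections.insert "goal" (PySem.Str.strip (PySem.Str.slice stripped (some 5) none)), "goal")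
    else if PySem.Str.startswith lowered "audience:" then
      (sections.insert "audience" (PySem.Str.strip (PySem.Str.slice stripped (some 9) none)), "audience")
    else if PySem.Str.startswith lowered "tone:" then
      (sections.insert "tone" (PySem.Str.strip (PySem.Str.slice stripped (some 5) none)), "tone")
    else if PySem.Str.startswith lowered "offer:" then
      (sections.insert "offer" (PySem.Str.strip (PySem.Str.slice stripped (some 6) none)), "offer")
    else if current ≠ "" then
      let existing := sections.getD current ""
      (sections.insert current (PySem.Str.strip (existing ++ " " ++ stripped)), current)
    else st

def parse_campaign_prompt_py (prompt_text : String) : List (String × String) :=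
  let init : PySem.Dict String String :=
    PySem.Dict.ofList [("goal", ""), ("audience", ""), ("tone", ""), ("offer", "")]
  let final := (PySem.Str.splitlines prompt_text).foldl pvStepA (init, "")
  final.1.items

-- ===== PORT B =====
def pvLabels : List (String × String) :=
  [("goal", "goal:"), ("audience", "audience:"), ("tone", "tone:"), ("offer", "offer:")]

-- pass 1 step: open a new group on a label line, else extend the last group's body
def pvGroupStep (groups : List (String × List String)) (line : String) :
    List (String × List String) :=
  let stripped := PySem.Str.strip line
  if stripped = "" then groups
  else
    let low := PySem.Str.lower stripped
    match pvLabels.find? (fun kt => PySem.Str.startswith low kt.2) with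
    | some kt =>
        groups ++ [(kt.1, [PySem.Str.strip (PySem.Str.slice stripped (some (PySem.Str.len kt.2)) none)])]
    | none =>
        match groups.getLast? with
        | some g => groups.dropLast ++ [(g.1, g.2 ++ [stripped])]
        | none => groups

-- " ".join(p for p in parts if p)
def pvJoinVal (parts : List String) : String :=
  PySem.Str.join " " (parts.filter (fun p => p ≠ ""))

-- pass 2: one value per group, later groups overwrite
def pvFinish (groups : List (String × List String)) : PySem.Dict String String :=
  groups.foldl (fun d g => d.insert g.1 (pvJoinVal g.2))
    (PySem.Dict.ofList (pvLabels.map (fun kt => (kt.1, ""))))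

def parse_campaign_prompt_py_alt (prompt_text : String) : List (String × String) :=
  (pvFinish ((PySem.Str.splitlines prompt_text).foldl pvGroupStep [])).items

-- ===== PRECONDITION & SPEC =====
def Spec_parse_campaign_prompt_py (prompt_text : String) (out : List (String × String)) : Prop := out = parse_campaign_prompt_py_alt prompt_text
instance (prompt_text : String) (out : List (String × String)) : Decidable (Spec_parse_campaign_prompt_py prompt_text out) := by unfold Spec_parse_campaign_prompt_py; infer_instance

-- ===== CLAIM (what is proved, stated in full; the proofs are below) =====
def Claim_equal_parse_campaign_prompt_py : Prop := ∀ (prompt_text : String), Dom_parse_campaign_prompt_py prompt_text → Spec_parse_campaign_prompt_py prompt_text (parse_campaign_prompt_py prompt_text)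

-- ===== LEMMAS AND PROOFS =====

-- a string is "clean" if stripping does nothing
def pvClean (s : String) : Prop := PySem.Chars.strip s.toList = s.toList

-- well-formedness of a group list: keys are nonempty, every body piece is clean
def pvWF (groups : List (String × List String)) : Prop :=
  ∀ g ∈ groups, g.1 ≠ "" ∧ ∀ p ∈ g.2, PySem.Chars.strip p.toList = p.toList

def pvCur (groups : List (String × List String)) : String :=
  ((groups.getLast?).map Prod.fst).getD ""

-- ---- character-level facts about strip ----

theorem pv_lstrip_of_strip_eq (a : List Char) (ha : PySem.Chars.strip a = a) :
    PySem.Chars.lstrip a = a := by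
  have hsuf : PySem.Chars.lstrip a <:+ a := List.dropWhile_suffix _
  refine hsuf.eq_of_length ?_
  have h1 : (PySem.Chars.strip a).length ≤ (PySem.Chars.lstrip a).length := by
    simp only [PySem.Chars.strip, PySem.Chars.rstrip, List.length_reverse]
    exact le_trans (List.length_dropWhile_le _ _) (by simp)
  have h2 := hsuf.length_le
  rw [ha] at h1
  omega

theorem pv_rstrip_of_strip_eq (a : List Char) (ha : PySem.Chars.strip a = a) :
    PySem.Chars.rstrip a = a := by
  have h := pv_lstrip_of_strip_eq a ha
  calc PySem.Chars.rstrip a = PySem.Chars.rstrip (PySem.Chars.lstrip a) := by rw [h]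
    _ = a := ha

theorem pv_rstrip_idem (z : List Char) :
    PySem.Chars.rstrip (PySem.Chars.rstrip z) = PySem.Chars.rstrip z := by
  simp [PySem.Chars.rstrip, List.dropWhile_idempotent]

theorem pv_rstrip_prefix (z : List Char) : PySem.Chars.rstrip z <+: z := by
  have := List.reverse_prefix.mpr (List.dropWhile_suffix (l := z.reverse) PySem.Chars.isspace)
  simpa [PySem.Chars.rstrip] using this

theorem pv_strip_idem (a : List Char) :
    PySem.Chars.strip (PySem.Chars.strip a) = PySem.Chars.strip a := by
  set z := PySem.Chars.lstrip a with hz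
  have hzz : PySem.Chars.lstrip z = z := List.dropWhile_idempotent _ _
  have hpre : PySem.Chars.rstrip z <+: z := pv_rstrip_prefix z
  have hly : PySem.Chars.lstrip (PySem.Chars.rstrip z) = PySem.Chars.rstrip z := by
    rw [PySem.Chars.lstrip, List.dropWhile_eq_self_iff]
    intro hl
    have hzlen : 0 < z.length := lt_of_lt_of_le hl hpre.length_le
    have hget : (PySem.Chars.rstrip z)[0] = z[0] := hpre.getElem hl
    rw [hget]
    exact (List.dropWhile_eq_self_iff.mp hzz) hzlen
  show PySem.Chars.rstrip (PySem.Chars.lstrip (PySem.Chars.rstrip z)) = PySem.Chars.rstrip z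
  rw [hly, pv_rstrip_idem]

theorem pv_strip_clean_concat (a b : List Char)
    (ha : PySem.Chars.strip a = a) (hb : PySem.Chars.strip b = b) (hb0 : b ≠ []) :
    PySem.Chars.strip (a ++ ' ' :: b) = if a = [] then b else a ++ ' ' :: b := by
  by_cases h0 : a = []
  · subst h0
    simp only [List.nil_append]
    show PySem.Chars.rstrip (PySem.Chars.lstrip (' ' :: b)) = b
    have : PySem.Chars.lstrip (' ' :: b) = PySem.Chars.lstrip b := by
      simp [PySem.Chars.lstrip, (by decide : PySem.Chars.isspace ' ' = true)]
    rw [this]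
    exact hb
  · rw [if_neg h0]
    have ha1 := pv_lstrip_of_strip_eq a ha
    have hb2 := pv_rstrip_of_strip_eq b hb
    have halen : 0 < a.length := List.length_pos_of_ne_nil h0
    have hahead : ¬ PySem.Chars.isspace a[0] = true := (List.dropWhile_eq_self_iff.mp ha1) halen
    have hl : PySem.Chars.lstrip (a ++ ' ' :: b) = a ++ ' ' :: b := by
      rw [PySem.Chars.lstrip, List.dropWhile_eq_self_iff]
      intro hl
      rw [List.getElem_append_left halen]
      exact hahead
    have hbrev : List.dropWhile PySem.Chars.isspace b.reverse = b.reverse := by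
      have := congrArg List.reverse hb2
      simpa [PySem.Chars.rstrip] using this
    have hbrevlen : 0 < b.reverse.length := by
      simpa using List.length_pos_of_ne_nil hb0
    have hbrevhead : ¬ PySem.Chars.isspace b.reverse[0] = true :=
      (List.dropWhile_eq_self_iff.mp hbrev) hbrevlen
    have hr : PySem.Chars.rstrip (a ++ ' ' :: b) = a ++ ' ' :: b := by
      have hrev : (a ++ ' ' :: b).reverse = b.reverse ++ ' ' :: a.reverse := by
        simp
      rw [PySem.Chars.rstrip, hrev, List.dropWhile_eq_self_iff.mpr ?_, ← hrev, List.reverse_reverse]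
      intro hl
      rw [List.getElem_append_left hbrevlen]
      exact hbrevhead
    show PySem.Chars.rstrip (PySem.Chars.lstrip (a ++ ' ' :: b)) = a ++ ' ' :: b
    rw [hl, hr]

theorem pv_clean_strip (s : String) : pvClean (PySem.Str.strip s) := by
  show PySem.Chars.strip (PySem.Str.strip s).toList = (PySem.Str.strip s).toList
  rw [PySem.Str.toList_strip, pv_strip_idem]

theorem pv_joinVal_single (v : String) : pvJoinVal [v] = v := by
  by_cases hv : v = ""
  · subst hv; decide
  · apply String.toList_inj.mp
    simp [pvJoinVal, hv, PySem.Str.toList_join, PySem.Chars.join_singleton]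

theorem pv_join_clean (qs : List (List Char))
    (h : ∀ q ∈ qs, PySem.Chars.strip q = q ∧ q ≠ []) :
    PySem.Chars.strip (PySem.Chars.join [' '] qs) = PySem.Chars.join [' '] qs
      ∧ (PySem.Chars.join [' '] qs = [] ↔ qs = []) := by
  induction qs with
  | nil => exact ⟨rfl, by simp [PySem.Chars.join_nil]⟩
  | cons q t ih =>
      match t with
      | [] =>
          obtain ⟨hq, hq0⟩ := h q (by simp)
          exact ⟨by simpa [PySem.Chars.join_singleton] using hq, by simp [PySem.Chars.join_singleton, hq0]⟩
      | q' :: t' =>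
          obtain ⟨hq, hq0⟩ := h q (by simp)
          obtain ⟨ih1, ih2⟩ := ih (fun x hx => h x (by simp [hx]))
          have hne : PySem.Chars.join [' '] (q' :: t') ≠ [] := by
            intro hc; simpa using ih2.mp hc
          have hcons : PySem.Chars.join [' '] (q :: q' :: t')
              = q ++ ' ' :: PySem.Chars.join [' '] (q' :: t') := by
            rw [PySem.Chars.join_cons_cons]; simp
          constructor
          · rw [hcons, pv_strip_clean_concat _ _ hq ih1 hne, if_neg hq0]
          · constructor
            · intro hc; rw [hcons] at hc; simp [hq0] at hc
            · intro hc; cases hc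

theorem pv_filter_clean (ps : List String) (h : ∀ p ∈ ps, pvClean p) :
    ∀ q ∈ (ps.filter (fun p => p ≠ "")).map String.toList,
      PySem.Chars.strip q = q ∧ q ≠ [] := by
  intro q hq
  simp only [List.mem_map, List.mem_filter] at hq
  obtain ⟨p, ⟨hp, hp0⟩, rfl⟩ := hq
  refine ⟨h p hp, ?_⟩
  simp only [decide_not, Bool.not_eq_eq_eq_not] at hp0
  simpa [String.toList_eq_nil_iff] using hp0

theorem pv_joinVal_clean (ps : List String) (h : ∀ p ∈ ps, pvClean p) :
    pvClean (pvJoinVal ps) := by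
  show PySem.Chars.strip (pvJoinVal ps).toList = (pvJoinVal ps).toList
  rw [pvJoinVal, PySem.Str.toList_join]
  exact (pv_join_clean _ (pv_filter_clean ps h)).1

theorem pv_join_concat (qs : List (List Char)) (x : List Char) :
    PySem.Chars.join [' '] (qs ++ [x])
      = if qs = [] then x else PySem.Chars.join [' '] qs ++ ' ' :: x := by
  induction qs with
  | nil => simp [PySem.Chars.join_singleton]
  | cons q t ih =>
      match t with
      | [] => simp [PySem.Chars.join_cons_cons, PySem.Chars.join_singleton]
      | q' :: t' =>
          simp only [List.cons_append] at ih ⊢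
          rw [PySem.Chars.join_cons_cons, ih, if_neg (by simp), if_neg (by simp),
            PySem.Chars.join_cons_cons]
          simp

theorem pv_joinVal_concat (ps : List String) (s : String)
    (h : ∀ p ∈ ps, pvClean p) (hs : pvClean s) (hs0 : s ≠ "") :
    PySem.Str.strip (pvJoinVal ps ++ " " ++ s) = pvJoinVal (ps ++ [s]) := by
  apply String.toList_inj.mp
  have hs0' : s.toList ≠ [] := by simpa [String.toList_eq_nil_iff] using hs0
  have hfilter : (ps ++ [s]).filter (fun p => p ≠ "") = ps.filter (fun p => p ≠ "") ++ [s] := by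
    simp [List.filter_append, hs0]
  have hL : (pvJoinVal ps ++ " " ++ s).toList = (pvJoinVal ps).toList ++ ' ' :: s.toList := by
    simp [String.toList_append]
  rw [PySem.Str.toList_strip, hL,
    pv_strip_clean_concat _ _ (pv_joinVal_clean ps h) hs hs0']
  have hj : (pvJoinVal ps).toList = PySem.Chars.join [' '] ((ps.filter (fun p => p ≠ "")).map String.toList) := by
    simp [pvJoinVal, PySem.Str.toList_join]
  have hr : (pvJoinVal (ps ++ [s])).toList
      = if (pvJoinVal ps).toList = [] then s.toList else (pvJoinVal ps).toList ++ ' ' :: s.toList := by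
    have hsep : (" " : String).toList = [' '] := by decide
    rw [pvJoinVal, hfilter, PySem.Str.toList_join, List.map_append, List.map_singleton]
    simp only [hsep]
    rw [pv_join_concat, hj]
    have hempty := (pv_join_clean _ (pv_filter_clean ps h)).2
    by_cases hq : (ps.filter (fun p => p ≠ "")).map String.toList = []
    · rw [if_pos hq, if_pos (hempty.mpr hq)]
    · rw [if_neg hq, if_neg (fun hc => hq (hempty.mp hc))]
  rw [hr]

-- ---- the step correspondence ----


theorem pv_finish_concat (gs : List (String × List String)) (x : String × List String) :
    pvFinish (gs ++ [x]) = (pvFinish gs).insert x.1 (pvJoinVal x.2) := by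
  simp [pvFinish, List.foldl_append]

theorem pv_label (g : List (String × List String)) (k v : String)
    (hk : k ≠ "") (hv : pvClean v) (hwf : pvWF g) :
    ((pvFinish g).insert k v, k)
      = (pvFinish (g ++ [(k, [v])]), pvCur (g ++ [(k, [v])]))
    ∧ pvWF (g ++ [(k, [v])]) := by
  refine ⟨?_, ?_⟩
  · rw [pv_finish_concat, pv_joinVal_single]
    simp [pvCur]
  · intro g' hg'
    rcases List.mem_append.mp hg' with h | h
    · exact hwf g' h
    · simp only [List.mem_singleton] at h
      subst h
      refine ⟨hk, ?_⟩
      intro p hp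
      simp only [List.mem_singleton] at hp
      subst hp
      exact hv

theorem pv_cont (gs : List (String × List String)) (k : String) (ps : List String) (s : String)
    (hwf : pvWF (gs ++ [(k, ps)])) (hs : pvClean s) (hs0 : s ≠ "") :
    ((pvFinish (gs ++ [(k, ps)])).insert k
        (PySem.Str.strip ((pvFinish (gs ++ [(k, ps)])).getD k "" ++ " " ++ s)), k)
      = (pvFinish (gs ++ [(k, ps ++ [s])]), pvCur (gs ++ [(k, ps ++ [s])]))
    ∧ pvWF (gs ++ [(k, ps ++ [s])]) := by
  have hmem : (k, ps) ∈ gs ++ [(k, ps)] := by simp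
  obtain ⟨hk, hps⟩ := hwf (k, ps) hmem
  have hpsc : ∀ p ∈ ps, pvClean p := hps
  refine ⟨?_, ?_⟩
  · rw [pv_finish_concat, pv_finish_concat]
    simp only [PySem.Dict.getD_insert_self, PySem.Dict.insert_insert_self]
    rw [pv_joinVal_concat ps s hpsc hs hs0]
    simp [pvCur]
  · intro g' hg'
    rcases List.mem_append.mp hg' with h | h
    · exact hwf g' (List.mem_append.mpr (Or.inl h))
    · simp only [List.mem_singleton] at h
      subst h
      refine ⟨hk, ?_⟩
      intro p hp
      rcases List.mem_append.mp hp with h' | h'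
      · exact hps p h'
      · simp only [List.mem_singleton] at h'
        subst h'
        exact hs

theorem pv_step (g : List (String × List String)) (line : String) (hwf : pvWF g) :
    pvStepA (pvFinish g, pvCur g) line
      = (pvFinish (pvGroupStep g line), pvCur (pvGroupStep g line))
    ∧ pvWF (pvGroupStep g line) := by
  by_cases hs : PySem.Str.strip line = ""
  · constructor
    · simp [pvStepA, pvGroupStep, hs]
    · simpa [pvGroupStep, hs] using hwf
  · have hclean : pvClean (PySem.Str.strip line) := pv_clean_strip line
    by_cases h1 : PySem.Chars.startswith (PySem.Chars.lower (PySem.Chars.strip line.toList))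
        ['g', 'o', 'a', 'l', ':'] = true
    · have hlen : PySem.Str.len "goal:" = (5 : Int) := by decide
      have := pv_label g "goal"
        (PySem.Str.strip (PySem.Str.slice (PySem.Str.strip line) (some 5) none))
        (by decide) (pv_clean_strip _) hwf
      constructor
      · simpa [pvStepA, pvGroupStep, pvLabels, List.find?, hs, h1, hlen] using this.1
      · simpa [pvGroupStep, pvLabels, List.find?, hs, h1, hlen] using this.2
    · by_cases h2 : PySem.Chars.startswith (PySem.Chars.lower (PySem.Chars.strip line.toList))
          ['a', 'u', 'd', 'i', 'e', 'n', 'c', 'e', ':'] = true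
      · have hlen : PySem.Str.len "audience:" = (9 : Int) := by decide
        have := pv_label g "audience"
          (PySem.Str.strip (PySem.Str.slice (PySem.Str.strip line) (some 9) none))
          (by decide) (pv_clean_strip _) hwf
        constructor
        · simpa [pvStepA, pvGroupStep, pvLabels, List.find?, hs, h1, h2, hlen] using this.1
        · simpa [pvGroupStep, pvLabels, List.find?, hs, h1, h2, hlen] using this.2
      · by_cases h3 : PySem.Chars.startswith (PySem.Chars.lower (PySem.Chars.strip line.toList))
            ['t', 'o', 'n', 'e', ':'] = true
        · have hlen : PySem.Str.len "tone:" = (5 : Int) := by decide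
          have := pv_label g "tone"
            (PySem.Str.strip (PySem.Str.slice (PySem.Str.strip line) (some 5) none))
            (by decide) (pv_clean_strip _) hwf
          constructor
          · simpa [pvStepA, pvGroupStep, pvLabels, List.find?, hs, h1, h2, h3, hlen] using this.1
          · simpa [pvGroupStep, pvLabels, List.find?, hs, h1, h2, h3, hlen] using this.2
        · by_cases h4 : PySem.Chars.startswith (PySem.Chars.lower (PySem.Chars.strip line.toList))
              ['o', 'f', 'f', 'e', 'r', ':'] = true
          · have hlen : PySem.Str.len "offer:" = (6 : Int) := by decide
            have := pv_label g "offer"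
              (PySem.Str.strip (PySem.Str.slice (PySem.Str.strip line) (some 6) none))
              (by decide) (pv_clean_strip _) hwf
            constructor
            · simpa [pvStepA, pvGroupStep, pvLabels, List.find?, hs, h1, h2, h3, h4, hlen] using this.1
            · simpa [pvGroupStep, pvLabels, List.find?, hs, h1, h2, h3, h4, hlen] using this.2
          · rcases List.eq_nil_or_concat g with hg | ⟨gs, x, hg⟩
            · subst hg
              constructor
              · simp [pvStepA, pvGroupStep, pvLabels, List.find?, hs, h1, h2, h3, h4, pvCur]
              · simpa [pvGroupStep, pvLabels, List.find?, hs, h1, h2, h3, h4] using hwf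
            · obtain ⟨k, ps⟩ := x
              rw [List.concat_eq_append] at hg
              subst hg
              have hk : k ≠ "" := (hwf (k, ps) (by simp)).1
              have hcur : pvCur (gs ++ [(k, ps)]) = k := by
                simp [pvCur]
              have hgrp : pvGroupStep (gs ++ [(k, ps)]) line
                  = gs ++ [(k, ps ++ [PySem.Str.strip line])] := by
                simp [pvGroupStep, pvLabels, List.find?, hs, h1, h2, h3, h4]
              have hc := pv_cont gs k ps (PySem.Str.strip line) hwf hclean hs
              constructor
              · rw [hgrp, ← hc.1]
                simp [pvStepA, hs, h1, h2, h3, h4, hcur, hk]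
              · rw [hgrp]
                exact hc.2

theorem pv_main (lines : List String) (g : List (String × List String)) (hwf : pvWF g) :
    lines.foldl pvStepA (pvFinish g, pvCur g)
      = (pvFinish (lines.foldl pvGroupStep g), pvCur (lines.foldl pvGroupStep g)) := by
  induction lines generalizing g with
  | nil => rfl
  | cons l ls ih =>
      obtain ⟨h1, h2⟩ := pv_step g l hwf
      simp only [List.foldl_cons, h1]
      exact ih _ h2

-- ===== VERDICT (by name: the statement is the Claim_ definition above) =====
theorem parse_campaign_prompt_py_spec : Claim_equal_parse_campaign_prompt_py := by
  intro s _
  unfold Spec_parse_campaign_prompt_py parse_campaign_prompt_py parse_campaign_prompt_py_alt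
  have h0 : pvWF [] := by intro g hg; cases hg
  have := pv_main (PySem.Str.splitlines s) [] h0
  have hinit : pvFinish [] = PySem.Dict.ofList [("goal", ""), ("audience", ""), ("tone", ""), ("offer", "")] := by
    decide
  have hcur : pvCur [] = "" := rfl
  rw [hinit, hcur] at this
  simp only [this]
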